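-- pv_equiv track=rewrite | github.com/NCAR/ccpp-framework | scripts/fortran_tools/fortran_write.py | _in_quote
-- ===== SOURCE A (Python) =====
-- def _in_quote(test_str):
--     """Return True if <test_str> ends in a character context.
--     >>> FortranWriter._in_quote("hi'mom")
--     True
--     >>> FortranWriter._in_quote("hi mom")
--     False
--     >>> FortranWriter._in_quote("'hi mom'")
--     False
--     >>> FortranWriter._in_quote("'hi"" mom'")
--     False
--     """
--     in_single_char = False
--     in_double_char = False
--     for char in test_str:
--         if in_single_char:
--             if char == "'":
--                 in_single_char = False
--             # end if
--         elif in_double_char: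
--             if char == '"':
--                 in_double_char = False
--             # end if
--         elif char == "'":
--             in_single_char = True
--         elif char == '"':
--             in_double_char = True
--         # end if
--     # end for
--     return in_single_char or in_double_char
-- ===== SOURCE B (Python) =====
-- def _in_quote(test_str):
--     chars = iter(test_str)
--     for char in chars:
--         if char == "'" or char == '"':
--             if char not in chars:
--                 return True
--     return False
-- ===== Notes on version B (the rewrite author's own statement) =====
-- stated objective: alternative
-- what changed: Replaces A's per-character three-state boolean machine with a quote-skipping scan: advance to each opening quote, then consume up to the matching closing quote via iterator membership, returning True when a closer is missing.
import Mathlib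
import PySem

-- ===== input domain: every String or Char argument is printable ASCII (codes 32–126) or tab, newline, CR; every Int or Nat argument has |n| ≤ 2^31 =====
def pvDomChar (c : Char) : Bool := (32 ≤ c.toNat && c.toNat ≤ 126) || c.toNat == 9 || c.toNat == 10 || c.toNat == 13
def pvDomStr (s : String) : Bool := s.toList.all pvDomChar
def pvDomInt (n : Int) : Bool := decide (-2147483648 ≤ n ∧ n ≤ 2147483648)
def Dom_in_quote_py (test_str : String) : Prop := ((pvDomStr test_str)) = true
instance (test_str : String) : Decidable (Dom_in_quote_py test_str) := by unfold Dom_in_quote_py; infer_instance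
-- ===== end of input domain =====

-- B replaces A's per-character boolean state machine by skipping to each quote's
-- closing partner (iterator membership / index jump); objective: alternative, same cost.

-- ===== PORT A =====
-- for char in test_str: the four branches in A's order, over the state (in_single_char, in_double_char)
def stepA (st : Bool × Bool) (c : Char) : Bool × Bool :=
  if st.1 then (if c = '\'' then (false, st.2) else st)
  else if st.2 then (if c = '"' then (st.1, false) else st)
  else if c = '\'' then (true, st.2)
  else if c = '"' then (st.1, true)
  else st

def in_quote_py (test_str : String) : Bool :=
  let st := test_str.toList.foldl stepA (false, false)
  st.1 || st.2

-- ===== PORT B =====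
-- the for-loop over the iterator: a non-quote char is skipped; at a quote char,
-- `char not in chars` consumes the rest up to and including the closing quote
-- (ported exactly as findIdx? + drop past the match; none = iterator exhausted → True)
def loopB : List Char → Bool
  | [] => false
  | c :: rest =>
    if c = '\'' ∨ c = '"' then
      match rest.findIdx? (· == c) with
      | none => true
      | some k => loopB (rest.drop (k + 1))
    else loopB rest
termination_by l => l.length
decreasing_by
  · simp only [List.length_drop]; exact Nat.lt_succ_of_le (Nat.sub_le _ _)
  · simp

def in_quote_py_alt (test_str : String) : Bool := loopB test_str.toList

-- ===== PRECONDITION & SPEC =====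
def Spec_in_quote_py (test_str : String) (out : Bool) : Prop := out = in_quote_py_alt test_str
instance (test_str : String) (out : Bool) : Decidable (Spec_in_quote_py test_str out) := by unfold Spec_in_quote_py; infer_instance

-- ===== CLAIM (what is proved, stated in full; the proofs are below) =====
def Claim_equal_in_quote_py : Prop := ∀ (test_str : String), Dom_in_quote_py test_str → Spec_in_quote_py test_str (in_quote_py test_str)

-- ===== LEMMAS AND PROOFS =====

-- the "inside a quote of kind q" state of A's machine
def stq (q : Char) : Bool × Bool := if q = '\'' then (true, false) else (false, true)

theorem stepA_in (q c : Char) (hq : q = '\'' ∨ q = '"') :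
    stepA (stq q) c = if c = q then (false, false) else stq q := by
  rcases hq with h | h <;> subst h <;> simp [stq, stepA]

theorem foldl_in_no_close (q : Char) (hq : q = '\'' ∨ q = '"') :
    ∀ l : List Char, (∀ x ∈ l, x ≠ q) → l.foldl stepA (stq q) = stq q := by
  intro l
  induction l with
  | nil => intro _; rfl
  | cons a t ih =>
      intro h
      have ha : a ≠ q := h a (by simp)
      simp only [List.foldl_cons, stepA_in q a hq, if_neg ha]
      exact ih fun x hx => h x (by simp [hx])

theorem foldl_in_close (q : Char) (hq : q = '\'' ∨ q = '"') :
    ∀ (l : List Char) (k : Nat), l.findIdx? (· == q) = some k →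
      l.foldl stepA (stq q) = (l.drop (k + 1)).foldl stepA (false, false) := by
  intro l
  induction l with
  | nil => intro k h; simp at h
  | cons a t ih =>
      intro k h
      by_cases ha : a = q
      · subst ha
        simp [List.findIdx?_cons] at h
        subst h
        simp [stepA_in a a hq]
      · have ha' : (a == q) = false := by simp [ha]
        simp only [List.findIdx?_cons, ha'] at h
        rcases Option.map_eq_some_iff.mp h with ⟨k', hk', rfl⟩
        simp only [List.foldl_cons, stepA_in q a hq, if_neg ha, List.drop_succ_cons]
        exact ih k' hk'

theorem loopB_eq_A : ∀ l : List Char,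
    loopB l = ((l.foldl stepA (false, false)).1 || (l.foldl stepA (false, false)).2) := by
  intro l
  fun_induction loopB l with
  | case1 => rfl
  | case2 c rest hc hfind =>
      have hst : stepA (false, false) c = stq c := by
        rcases hc with h | h <;> subst h <;> rfl
      have hnone : ∀ x ∈ rest, x ≠ c := by
        intro x hx
        have := List.findIdx?_eq_none_iff.mp hfind x hx
        simpa using this
      simp only [List.foldl_cons, hst, foldl_in_no_close c hc rest hnone]
      rcases hc with h | h <;> subst h <;> decide
  | case3 c rest hc k hfind ih =>
      have hst : stepA (false, false) c = stq c := by
        rcases hc with h | h <;> subst h <;> rfl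
      rw [List.foldl_cons, hst, foldl_in_close c hc rest k hfind]
      exact ih
  | case4 c rest hc ih =>
      have h1 : c ≠ '\'' := fun h => hc (Or.inl h)
      have h2 : c ≠ '"' := fun h => hc (Or.inr h)
      simpa [List.foldl_cons, stepA, h1, h2] using ih

-- ===== VERDICT (by name: the statement is the Claim_ definition above) =====
theorem in_quote_py_spec : Claim_equal_in_quote_py := by
  intro s _
  show in_quote_py s = in_quote_py_alt s
  simp [in_quote_py, in_quote_py_alt, loopB_eq_A]
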